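-- pv_equiv track=rewrite | github.com/schmittydog/algo_expert | minimum_passes_of_matrix.py | minimumPassesOfMatrix
-- ===== SOURCE A (Python) =====
-- from queue import deque
--
-- def minimumPassesOfMatrix(matrix):
--     height, width = len(matrix), len(matrix[0])
--     neg_set = set()
--     visited = set()
--     q = deque()
--     for h in range(height):
--         for w in range(width):
--             if matrix[h][w] < 0:
--                 neg_set.add((h,w))
--             elif matrix[h][w] == 0:
--                 visited.add((h,w))
--             else:
--                 visited.add((h,w))
--                 q.append((0,h,w))
--     passes = 0
--     while q:
--         passes, h, w = q.popleft()
--         neg_set.discard((h,w))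
--         if not neg_set:
--             break
--         for dh, dw in [[1,0],[-1,0],[0,1],[0,-1]]:
--             nxt_h, nxt_w = dh + h, dw + w
--             if (nxt_h, nxt_w) in visited:
--                 continue
--             if nxt_h < 0 or nxt_w < 0 or nxt_h >= height or nxt_w >= width:
--                 continue
--             visited.add((nxt_h, nxt_w))
--             q.append((passes+1, nxt_h, nxt_w))
--     if neg_set:
--         return -1
--     return passes
-- ===== SOURCE B (Python) =====
-- def minimumPassesOfMatrix(matrix):
--     height, width = len(matrix), len(matrix[0])
--     grid = [[matrix[h][w] for w in range(width)] for h in range(height)]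
--     passes = 0
--     while True:
--         flips = [(h, w) for h in range(height) for w in range(width)
--                  if grid[h][w] < 0 and any(
--                      0 <= h + dh < height and 0 <= w + dw < width
--                      and grid[h + dh][w + dw] > 0
--                      for dh, dw in ((1, 0), (-1, 0), (0, 1), (0, -1)))]
--         if not flips:
--             break
--         for h, w in flips:
--             grid[h][w] = 1
--         passes += 1
--     if all(grid[h][w] >= 0 for h in range(height) for w in range(width)):
--         return passes
--     return -1
-- ===== Notes on version B (the rewrite author's own statement) =====
-- stated objective: alternative
-- what changed: Replaces A's multi-source BFS (FIFO queue of distance-labelled cells, visited set, negative set) by brute-force fixpoint simulation: repeatedly sweep the whole grid, flip every negative cell adjacent to a positive one, and count the productive sweeps; no queue, no visited set, no distance labels.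
import Mathlib
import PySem

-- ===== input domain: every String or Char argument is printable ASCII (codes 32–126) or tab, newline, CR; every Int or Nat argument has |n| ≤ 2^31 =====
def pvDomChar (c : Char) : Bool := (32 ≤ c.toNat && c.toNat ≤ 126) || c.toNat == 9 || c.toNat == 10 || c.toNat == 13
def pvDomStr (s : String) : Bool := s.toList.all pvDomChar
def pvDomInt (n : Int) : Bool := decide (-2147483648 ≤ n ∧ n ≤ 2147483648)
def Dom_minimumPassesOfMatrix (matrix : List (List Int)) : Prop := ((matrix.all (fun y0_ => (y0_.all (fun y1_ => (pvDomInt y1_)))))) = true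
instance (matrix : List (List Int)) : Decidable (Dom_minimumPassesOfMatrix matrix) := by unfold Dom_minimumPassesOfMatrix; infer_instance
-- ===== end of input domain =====

-- B replaces A's multi-source BFS (FIFO queue of distance-labelled cells, visited set, negative
-- set) by brute-force fixpoint simulation: repeatedly sweep the whole grid, flip every negative
-- cell adjacent to a positive one, and count the productive sweeps; objective: alternative
-- algorithm. Neither implementation mutates its input (B copies the matrix first).

-- ===== PORT A =====
-- matrix[h][w] for indices the loops keep in range (Pre_ guarantees the ranges are in range)
def pvGet (matrix : List (List Int)) (h w : Int) : Int :=
  PySem.List.pyGetD (PySem.List.pyGetD matrix h []) w 0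

def pvDirs : List (Int × Int) := [(1, 0), (-1, 0), (0, 1), (0, -1)]

-- all in-bounds cells, row-major (A: termination measure / proofs; B: the sweep order)
def pvCells (height width : Int) : List (Int × Int) :=
  (PySem.List.pyRange 0 height 1).flatMap (fun h => (PySem.List.pyRange 0 width 1).map (fun w => (h, w)))

-- number of in-bounds cells not yet visited (termination measure for A's loop)
def pvUnvis (height width : Int) (vis : PySem.Set (Int × Int)) : Nat :=
  ((pvCells height width).filter (fun c => c ∉ vis)).length

-- A's initial scan: builds (neg_set, visited, queue)
def pvScanA (matrix : List (List Int)) (height width : Int) :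
    PySem.Set (Int × Int) × PySem.Set (Int × Int) × List (Int × Int × Int) :=
  (PySem.List.pyRange 0 height 1).foldl (fun st h =>
    (PySem.List.pyRange 0 width 1).foldl (fun st w =>
      if pvGet matrix h w < 0 then (PySem.Set.add st.1 (h, w), st.2.1, st.2.2)
      else if pvGet matrix h w = 0 then (st.1, PySem.Set.add st.2.1 (h, w), st.2.2)
      else (st.1, PySem.Set.add st.2.1 (h, w), st.2.2 ++ [(0, h, w)])) st)
    (PySem.Set.empty, PySem.Set.empty, [])

-- A's inner `for dh, dw in [[1,0],[-1,0],[0,1],[0,-1]]` loop over one popped cell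
def pvExpandA (height width p h w : Int)
    (st : List (Int × Int × Int) × PySem.Set (Int × Int)) :
    List (Int × Int × Int) × PySem.Set (Int × Int) :=
  pvDirs.foldl (fun st d =>
    let nh := d.1 + h
    let nw := d.2 + w
    if (nh, nw) ∈ st.2 then st
    else if nh < 0 ∨ nw < 0 ∨ nh ≥ height ∨ nw ≥ width then st
    else (st.1 ++ [(p + 1, nh, nw)], PySem.Set.add st.2 (nh, nw))) st

-- ----- facts cited by the ports' termination proofs -----

theorem pvMem_pvCells (height width : Int) (c : Int × Int) :
    c ∈ pvCells height width ↔ 0 ≤ c.1 ∧ c.1 < height ∧ 0 ≤ c.2 ∧ c.2 < width := by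
  obtain ⟨a, b⟩ := c
  simp only [pvCells, List.mem_flatMap, List.mem_map, PySem.List.mem_pyRange_one, Prod.mk.injEq]
  constructor
  · rintro ⟨x, hx, y, hy, rfl, rfl⟩; exact ⟨hx.1, hx.2, hy.1, hy.2⟩
  · rintro ⟨h1, h2, h3, h4⟩; exact ⟨a, ⟨h1, h2⟩, b, ⟨h3, h4⟩, rfl, rfl⟩

theorem pvNodup_pvCells (height width : Int) : (pvCells height width).Nodup := by
  have h : pvCells height width = (PySem.List.pyRange 0 height 1).product (PySem.List.pyRange 0 width 1) := rfl
  rw [h]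
  exact List.Nodup.product (PySem.List.nodup_pyRange_one _ _) (PySem.List.nodup_pyRange_one _ _)

theorem pvFilterLen (c : Int × Int) (vis : PySem.Set (Int × Int)) (hv : c ∉ vis) :
    ∀ (L : List (Int × Int)), L.Nodup → c ∈ L →
    (L.filter (fun a => a ∉ PySem.Set.add vis c)).length + 1 = (L.filter (fun a => a ∉ vis)).length := by
  intro L
  induction L with
  | nil => intro _ h; simp at h
  | cons y ys ih =>
    intro hnd hc
    have hnd' := List.nodup_cons.mp hnd
    by_cases hyc : y = c
    · subst hyc
      have h1 : (ys.filter (fun a => a ∉ PySem.Set.add vis y)) = (ys.filter (fun a => a ∉ vis)) := by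
        apply List.filter_congr
        intro a ha
        have hay : a ≠ y := fun h => hnd'.1 (h ▸ ha)
        simp [PySem.Set.mem_add, hay]
      have hyin : y ∈ PySem.Set.add vis y := by simp [PySem.Set.mem_add]
      rw [List.filter_cons, List.filter_cons, if_neg (by simp [hyin]), if_pos (by simpa using hv)]
      rw [h1]
      simp
    · have hcys : c ∈ ys := by
        rcases List.mem_cons.mp hc with h | h
        · exact absurd h.symm hyc
        · exact h
      have hmem : (y ∈ PySem.Set.add vis c) ↔ y ∈ vis := by
        simp [PySem.Set.mem_add, hyc]
      have hih := ih hnd'.2 hcys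
      by_cases hyv : y ∈ vis
      · rw [List.filter_cons, List.filter_cons, if_neg (by simp [hmem, hyv]), if_neg (by simp [hyv])]
        exact hih
      · rw [List.filter_cons, List.filter_cons, if_pos (by simp [hmem, hyv]), if_pos (by simp [hyv])]
        simp only [List.length_cons]
        omega

theorem pvUnvis_add (height width : Int) (vis : PySem.Set (Int × Int)) (c : Int × Int)
    (hc : c ∈ pvCells height width) (hv : c ∉ vis) :
    pvUnvis height width (PySem.Set.add vis c) + 1 = pvUnvis height width vis :=
  pvFilterLen c vis hv _ (pvNodup_pvCells height width) hc

theorem pvUnvis_update (height width : Int) (Δ : List (Int × Int)) :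
    ∀ (vis : PySem.Set (Int × Int)), Δ.Nodup → (∀ n ∈ Δ, n ∈ pvCells height width ∧ n ∉ vis) →
    pvUnvis height width (PySem.Set.update vis Δ) + Δ.length = pvUnvis height width vis := by
  induction Δ with
  | nil => intro vis _ _; rw [PySem.Set.update_nil]; simp
  | cons d Δ' ih =>
    intro vis hnd hp
    have hd := hp d (by simp)
    have hstep := pvUnvis_add height width vis d hd.1 hd.2
    have hnd' := List.nodup_cons.mp hnd
    have hih := ih (PySem.Set.add vis d) hnd'.2 (fun n hn => by
      refine ⟨(hp n (by simp [hn])).1, fun hmem => ?_⟩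
      rcases (PySem.Set.mem_add vis d n).mp hmem with h | h
      · exact (hp n (by simp [hn])).2 h
      · exact hnd'.1 (h ▸ hn))
    rw [PySem.Set.update_cons]
    simp only [List.length_cons]
    omega

-- generic version of pvUnvis_update for an arbitrary nodup list
theorem pvFilterUpdate (L : List (Int × Int)) (hL : L.Nodup) (Δ : List (Int × Int)) :
    ∀ (vis : PySem.Set (Int × Int)), Δ.Nodup → (∀ n ∈ Δ, n ∈ L ∧ n ∉ vis) →
    ((L.filter (fun a => a ∉ PySem.Set.update vis Δ)).length + Δ.length
      = (L.filter (fun a => a ∉ vis)).length) := by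
  induction Δ with
  | nil => intro vis _ _; rw [PySem.Set.update_nil]; simp
  | cons d Δ' ih =>
    intro vis hnd hp
    have hd := hp d (by simp)
    have hstep := pvFilterLen d vis hd.2 L hL hd.1
    have hnd' := List.nodup_cons.mp hnd
    have hih := ih (PySem.Set.add vis d) hnd'.2 (fun n hn => by
      refine ⟨(hp n (by simp [hn])).1, fun hmem => ?_⟩
      rcases (PySem.Set.mem_add vis d n).mp hmem with h | h
      · exact (hp n (by simp [hn])).2 h
      · exact hnd'.1 (h ▸ hn))
    rw [PySem.Set.update_cons]
    simp only [List.length_cons]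
    omega

theorem pvEmptyUpdate (L : List (Int × Int)) (hL : L.Nodup) :
    PySem.Set.update PySem.Set.empty L = L := by
  have h : PySem.Set.update PySem.Set.empty L = PySem.Set.ofList L := rfl
  rw [h, PySem.Set.ofList_eq_self_of_nodup L hL]

-- what A's inner fold does to (queue, visited): appends the fresh in-bounds cells Δ
theorem pvFoldA (height width p : Int) (ns : List (Int × Int)) :
    ∀ (rest : List (Int × Int × Int)) (vis : PySem.Set (Int × Int)),
    ∃ Δ : List (Int × Int),
      ns.foldl (fun st n =>
          if (n.1, n.2) ∈ st.2 then st
          else if n.1 < 0 ∨ n.2 < 0 ∨ n.1 ≥ height ∨ n.2 ≥ width then st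
          else (st.1 ++ [(p + 1, n.1, n.2)], PySem.Set.add st.2 (n.1, n.2))) (rest, vis)
        = (rest ++ Δ.map (fun n => (p + 1, n.1, n.2)), PySem.Set.update vis Δ)
      ∧ Δ.Nodup ∧ ∀ n ∈ Δ, n ∈ pvCells height width ∧ n ∉ vis := by
  induction ns with
  | nil =>
    intro rest vis
    exact ⟨[], by simp [PySem.Set.update_nil], List.nodup_nil, by simp⟩
  | cons n ns ih =>
    intro rest vis
    simp only [List.foldl_cons]
    by_cases hv : n ∈ vis
    · have hA : ((n.1, n.2) ∈ vis) := by rwa [Prod.mk.eta]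
      rw [if_pos hA]
      exact ih rest vis
    · by_cases hin : 0 ≤ n.1 ∧ n.1 < height ∧ 0 ≤ n.2 ∧ n.2 < width
      · have hA : ¬ ((n.1, n.2) ∈ vis) := by rwa [Prod.mk.eta]
        rw [if_neg hA, if_neg (by omega)]
        obtain ⟨Δ', h1, h3, h4⟩ := ih (rest ++ [(p + 1, n.1, n.2)]) (PySem.Set.add vis (n.1, n.2))
        refine ⟨n :: Δ', ?_, ?_, ?_⟩
        · rw [Prod.mk.eta] at h1
          rw [h1, PySem.Set.update_cons]
          simp [List.append_assoc]
        · refine List.nodup_cons.mpr ⟨?_, h3⟩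
          intro hn
          rw [Prod.mk.eta] at h4
          exact (h4 n hn).2 (by simp [PySem.Set.mem_add])
        · intro a ha
          rw [Prod.mk.eta] at h4
          rcases List.mem_cons.mp ha with rfl | ha'
          · exact ⟨(pvMem_pvCells height width a).mpr hin, hv⟩
          · obtain ⟨hc, hnv⟩ := h4 a ha'
            refine ⟨hc, fun hav => hnv ?_⟩
            simp [PySem.Set.mem_add, hav]
      · have hA : ¬ ((n.1, n.2) ∈ vis) := by rwa [Prod.mk.eta]
        rw [if_neg hA, if_pos (by omega)]
        exact ih rest vis

theorem pvExpandA_eq (height width p h w : Int)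
    (rest : List (Int × Int × Int)) (vis : PySem.Set (Int × Int)) :
    pvExpandA height width p h w (rest, vis)
      = (pvDirs.map (fun d => (d.1 + h, d.2 + w))).foldl (fun st n =>
          if (n.1, n.2) ∈ st.2 then st
          else if n.1 < 0 ∨ n.2 < 0 ∨ n.1 ≥ height ∨ n.2 ≥ width then st
          else (st.1 ++ [(p + 1, n.1, n.2)], PySem.Set.add st.2 (n.1, n.2))) (rest, vis) := by
  rw [List.foldl_map]; rfl

theorem pvExpandA_measure (height width p h w : Int)
    (rest : List (Int × Int × Int)) (vis : PySem.Set (Int × Int)) :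
    (pvExpandA height width p h w (rest, vis)).1.length
        + pvUnvis height width (pvExpandA height width p h w (rest, vis)).2
      = rest.length + pvUnvis height width vis := by
  obtain ⟨Δ, h1, h3, h4⟩ :=
    pvFoldA height width p (pvDirs.map (fun d => (d.1 + h, d.2 + w))) rest vis
  rw [pvExpandA_eq, h1]
  simp only [List.length_append, List.length_map]
  have := pvUnvis_update height width Δ vis h3 h4
  omega

-- A's `while q:` loop
def pvLoopA (height width : Int) (q : List (Int × Int × Int))
    (vis neg : PySem.Set (Int × Int)) (passes : Int) : Int :=
  match q with
  | [] => if neg ≠ [] then -1 else passes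
  | (p, h, w) :: rest =>
    let neg' := PySem.Set.discard neg (h, w)
    if neg' = [] then p
    else
      pvLoopA height width (pvExpandA height width p h w (rest, vis)).1
        (pvExpandA height width p h w (rest, vis)).2 neg' p
termination_by q.length + pvUnvis height width vis
decreasing_by
  have hm := pvExpandA_measure height width p h w rest vis
  simp only [List.length_cons]
  omega

def minimumPassesOfMatrix (matrix : List (List Int)) : Int :=
  let height : Int := matrix.length
  let width : Int := (PySem.List.pyGetD matrix 0 []).length
  let s := pvScanA matrix height width
  pvLoopA height width s.2.2 s.2.1 s.1 0

-- ===== PORT B =====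
-- B's copied working grid: grid = [[matrix[h][w] for w in range(width)] for h in range(height)]
def pvGrid0 (matrix : List (List Int)) (height width : Int) : List (List Int) :=
  (PySem.List.pyRange 0 height 1).map (fun h =>
    (PySem.List.pyRange 0 width 1).map (fun w => pvGet matrix h w))

def pvDirsB : List (Int × Int) := [(1, 0), (-1, 0), (0, 1), (0, -1)]

-- any(0 <= h+dh < height and 0 <= w+dw < width and grid[h+dh][w+dw] > 0 for dh, dw in …)
def pvHasPosNbr (g : List (List Int)) (height width : Int) (c : Int × Int) : Bool :=
  pvDirsB.any (fun d =>
    decide (0 ≤ c.1 + d.1 ∧ c.1 + d.1 < height ∧ 0 ≤ c.2 + d.2 ∧ c.2 + d.2 < width ∧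
            0 < pvGet g (c.1 + d.1) (c.2 + d.2)))

-- the comprehension building this sweep's flip list, in row-major order
def pvFlips (g : List (List Int)) (height width : Int) : List (Int × Int) :=
  (pvCells height width).filter
    (fun c => pvGet g c.1 c.2 < 0 ∧ pvHasPosNbr g height width c = true)

-- grid[h][w] = 1  (indices nonnegative and in range whenever B performs the assignment)
def pvSetCell (g : List (List Int)) (c : Int × Int) : List (List Int) :=
  g.set c.1.toNat ((g.getD c.1.toNat []).set c.2.toNat 1)

-- `for h, w in flips: grid[h][w] = 1`
def pvApply (g : List (List Int)) (fl : List (Int × Int)) : List (List Int) :=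
  fl.foldl pvSetCell g

-- number of still-negative cells (termination measure for B's loop)
def pvNegCount (g : List (List Int)) (height width : Int) : Nat :=
  ((pvCells height width).filter (fun c => pvGet g c.1 c.2 < 0)).length

-- ----- facts cited by pvSweepLoop's termination proof -----

theorem pvGet_nonneg (g : List (List Int)) (a b : Int) (ha : 0 ≤ a) (hb : 0 ≤ b) :
    pvGet g a b = (g.getD a.toNat []).getD b.toNat 0 := by
  unfold pvGet
  rw [PySem.List.pyGetD_of_nonneg _ _ ha, PySem.List.pyGetD_of_nonneg _ _ hb]

theorem pvGet_lt_range (g : List (List Int)) (a b : Int) (ha : 0 ≤ a) (hb : 0 ≤ b)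
    (h : pvGet g a b ≠ 0) :
    a.toNat < g.length ∧ b.toNat < (g.getD a.toNat []).length := by
  rw [pvGet_nonneg _ _ _ ha hb] at h
  constructor
  · by_contra hcon
    push_neg at hcon
    rw [List.getD_eq_default _ _ hcon] at h
    simp at h
  · by_contra hcon
    push_neg at hcon
    rw [List.getD_eq_default _ _ hcon] at h
    exact h rfl

theorem pvGet_setCell (g : List (List Int)) (c : Int × Int)
    (h1 : c.1.toNat < g.length) (h2 : c.2.toNat < (g.getD c.1.toNat []).length)
    (hc1 : 0 ≤ c.1) (hc2 : 0 ≤ c.2) (a b : Int) (ha : 0 ≤ a) (hb : 0 ≤ b) :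
    pvGet (pvSetCell g c) a b = if a = c.1 ∧ b = c.2 then 1 else pvGet g a b := by
  rw [pvGet_nonneg _ a b ha hb, pvGet_nonneg _ a b ha hb]
  unfold pvSetCell
  by_cases hA : a = c.1
  · have he : a.toNat = c.1.toNat := by rw [hA]
    rw [he]
    have hrow : ((g.set c.1.toNat ((g.getD c.1.toNat []).set c.2.toNat 1)).getD c.1.toNat [])
        = (g.getD c.1.toNat []).set c.2.toNat 1 := by
      simp [List.getD_eq_getElem?_getD, List.getElem?_set, h1]
    rw [hrow]
    by_cases hB : b = c.2
    · have he2 : b.toNat = c.2.toNat := by rw [hB]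
      have h2' : c.2.toNat < (g[c.1.toNat]?.getD []).length := by
        rwa [List.getD_eq_getElem?_getD] at h2
      rw [if_pos ⟨hA, hB⟩, he2]
      simp [List.getD_eq_getElem?_getD, List.getElem?_set, h2']
    · have hbn : c.2.toNat ≠ b.toNat := by omega
      rw [if_neg (by tauto)]
      simp [List.getD_eq_getElem?_getD, List.getElem?_set, hbn]
  · have han : c.1.toNat ≠ a.toNat := by omega
    rw [if_neg (by tauto)]
    have hrow : ((g.set c.1.toNat ((g.getD c.1.toNat []).set c.2.toNat 1)).getD a.toNat [])
        = g.getD a.toNat [] := by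
      simp [List.getD_eq_getElem?_getD, List.getElem?_set, han]
    rw [hrow]

theorem pvApply_get (fl : List (Int × Int)) :
    ∀ (g : List (List Int)), fl.Nodup →
    (∀ c ∈ fl, 0 ≤ c.1 ∧ 0 ≤ c.2 ∧ pvGet g c.1 c.2 < 0) →
    ∀ a b : Int, 0 ≤ a → 0 ≤ b →
    pvGet (pvApply g fl) a b = if (a, b) ∈ fl then 1 else pvGet g a b := by
  induction fl with
  | nil => intro g _ _ a b _ _; simp [pvApply]
  | cons c fl ih =>
    intro g hnd hp a b ha hb
    obtain ⟨hcnin, hnd'⟩ := List.nodup_cons.mp hnd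
    obtain ⟨hc1, hc2, hcneg⟩ := hp c List.mem_cons_self
    obtain ⟨hr1, hr2⟩ := pvGet_lt_range g c.1 c.2 hc1 hc2 (by omega)
    have hset := fun (x y : Int) (hx : 0 ≤ x) (hy : 0 ≤ y) =>
      pvGet_setCell g c hr1 hr2 hc1 hc2 x y hx hy
    have hprops : ∀ d ∈ fl, 0 ≤ d.1 ∧ 0 ≤ d.2 ∧ pvGet (pvSetCell g c) d.1 d.2 < 0 := by
      intro d hd
      obtain ⟨hd1, hd2, hdneg⟩ := hp d (List.mem_cons_of_mem c hd)
      refine ⟨hd1, hd2, ?_⟩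
      rw [hset d.1 d.2 hd1 hd2, if_neg ?_]
      · exact hdneg
      · rintro ⟨e1, e2⟩
        exact hcnin (by rwa [show d = c from Prod.ext_iff.mpr ⟨e1, e2⟩] at hd)
    have hstep : pvApply g (c :: fl) = pvApply (pvSetCell g c) fl := rfl
    rw [hstep, ih (pvSetCell g c) hnd' hprops a b ha hb]
    by_cases hab : (a, b) ∈ fl
    · rw [if_pos hab, if_pos (List.mem_cons_of_mem c hab)]
    · rw [if_neg hab, hset a b ha hb]
      by_cases he : a = c.1 ∧ b = c.2
      · rw [if_pos he, if_pos (by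
          rw [show ((a, b) : Int × Int) = c from Prod.ext_iff.mpr ⟨he.1, he.2⟩]
          exact List.mem_cons_self)]
      · rw [if_neg he, if_neg (by
          intro hmem
          rcases List.mem_cons.mp hmem with h | h
          · exact he ⟨congrArg Prod.fst h, congrArg Prod.snd h⟩
          · exact hab h)]

theorem pvFlips_mem (g : List (List Int)) (height width : Int) (c : Int × Int) :
    c ∈ pvFlips g height width ↔
      c ∈ pvCells height width ∧ pvGet g c.1 c.2 < 0 ∧ pvHasPosNbr g height width c = true := by
  simp [pvFlips, List.mem_filter, and_assoc]

theorem pvFlips_nodup (g : List (List Int)) (height width : Int) :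
    (pvFlips g height width).Nodup := (pvNodup_pvCells height width).filter _

theorem pvFlips_props (g : List (List Int)) (height width : Int) :
    ∀ c ∈ pvFlips g height width, 0 ≤ c.1 ∧ 0 ≤ c.2 ∧ pvGet g c.1 c.2 < 0 := by
  intro c hc
  obtain ⟨hcell, hneg, _⟩ := (pvFlips_mem g height width c).mp hc
  obtain ⟨b1, _, b3, _⟩ := (pvMem_pvCells height width c).mp hcell
  exact ⟨b1, b3, hneg⟩

theorem pvSweep_measure (g : List (List Int)) (height width : Int)
    (hne : pvFlips g height width ≠ []) :
    pvNegCount (pvApply g (pvFlips g height width)) height width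
      < pvNegCount g height width := by
  have happ := pvApply_get (pvFlips g height width) g (pvFlips_nodup g height width)
    (pvFlips_props g height width)
  have hfe : (pvCells height width).filter
        (fun c => pvGet (pvApply g (pvFlips g height width)) c.1 c.2 < 0)
      = (pvCells height width).filter
          (fun c => (decide (c ∉ pvFlips g height width)) && (decide (pvGet g c.1 c.2 < 0))) := by
    apply List.filter_congr
    intro c hc
    obtain ⟨b1, _, b3, _⟩ := (pvMem_pvCells height width c).mp hc
    rw [happ c.1 c.2 b1 b3]
    by_cases hm : c ∈ pvFlips g height width
    · rw [if_pos (by rwa [Prod.mk.eta])]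
      simp [hm]
    · rw [if_neg (by rwa [Prod.mk.eta])]
      simp [hm]
  have hff : (pvCells height width).filter
        (fun c => (decide (c ∉ pvFlips g height width)) && (decide (pvGet g c.1 c.2 < 0)))
      = ((pvCells height width).filter (fun c => pvGet g c.1 c.2 < 0)).filter
          (fun c => c ∉ pvFlips g height width) := (List.filter_filter).symm
  have hsub : ∀ c ∈ pvFlips g height width,
      c ∈ (pvCells height width).filter (fun c => pvGet g c.1 c.2 < 0)
        ∧ c ∉ (PySem.Set.empty : PySem.Set (Int × Int)) := by
    intro c hc
    obtain ⟨hcell, hneg, _⟩ := (pvFlips_mem g height width c).mp hc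
    exact ⟨List.mem_filter.mpr ⟨hcell, by simpa using hneg⟩, List.not_mem_nil⟩
  have hcnt := pvFilterUpdate ((pvCells height width).filter (fun c => pvGet g c.1 c.2 < 0))
    ((pvNodup_pvCells height width).filter _) (pvFlips g height width) PySem.Set.empty
    (pvFlips_nodup g height width) hsub
  rw [pvEmptyUpdate _ (pvFlips_nodup g height width)] at hcnt
  have hid : (((pvCells height width).filter (fun c => pvGet g c.1 c.2 < 0)).filter
        (fun a => a ∉ (PySem.Set.empty : PySem.Set (Int × Int))))
      = (pvCells height width).filter (fun c => pvGet g c.1 c.2 < 0) :=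
    List.filter_eq_self.mpr (fun a _ => by simp [PySem.Set.empty, List.not_mem_nil])
  rw [hid] at hcnt
  have hlen : 0 < (pvFlips g height width).length := List.length_pos_iff.mpr hne
  unfold pvNegCount
  rw [hfe, hff]
  omega

-- B's `while True:` sweep loop (with the final `all(...)` return folded in)
def pvSweepLoop (height width : Int) (g : List (List Int)) (passes : Int) : Int :=
  if h : pvFlips g height width = [] then
    (if (pvCells height width).all (fun c => decide (0 ≤ pvGet g c.1 c.2)) then passes else -1)
  else
    pvSweepLoop height width (pvApply g (pvFlips g height width)) (passes + 1)
termination_by pvNegCount g height width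
decreasing_by exact pvSweep_measure g height width h

def minimumPassesOfMatrix_alt (matrix : List (List Int)) : Int :=
  let height : Int := matrix.length
  let width : Int := (PySem.List.pyGetD matrix 0 []).length
  pvSweepLoop height width (pvGrid0 matrix height width) 0

-- ===== PRECONDITION & SPEC =====
-- Pre_ excludes exactly the inputs where the Python A raises IndexError: the empty matrix
-- (matrix[0]) and matrices with a row shorter than row 0 (matrix[h][w] for w < len(matrix[0])).
def Pre_minimumPassesOfMatrix (matrix : List (List Int)) : Prop :=
  matrix ≠ [] ∧ ∀ row ∈ matrix, matrix.headI.length ≤ row.length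
instance (matrix : List (List Int)) : Decidable (Pre_minimumPassesOfMatrix matrix) := by
  unfold Pre_minimumPassesOfMatrix; infer_instance

def pvWitness_minimumPassesOfMatrix : List (List Int) := [[1, -1], [0, -2]]

def Spec_minimumPassesOfMatrix (matrix : List (List Int)) (out : Int) : Prop := out = minimumPassesOfMatrix_alt matrix
instance (matrix : List (List Int)) (out : Int) : Decidable (Spec_minimumPassesOfMatrix matrix out) := by unfold Spec_minimumPassesOfMatrix; infer_instance

-- ===== CLAIM (what is proved, stated in full; the proofs are below) =====
def Claim_equal_minimumPassesOfMatrix : Prop := ∀ (matrix : List (List Int)), Dom_minimumPassesOfMatrix matrix → Pre_minimumPassesOfMatrix matrix → Spec_minimumPassesOfMatrix matrix (minimumPassesOfMatrix matrix)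

-- ===== LEMMAS AND PROOFS =====
-- Proof plan: A's labelled FIFO queue is first related to a wave-by-wave (frontier) recursion
-- (pvLoopB below, a proof-only intermediate), and that wave recursion is then related to B's
-- whole-grid sweep loop by the simulation invariant pvSim.

theorem pvLoopA_nil (height width : Int) (vis neg : PySem.Set (Int × Int)) (passes : Int) :
    pvLoopA height width [] vis neg passes = if neg ≠ [] then -1 else passes := by
  rw [pvLoopA]

theorem pvLoopA_cons (height width : Int) (p a b : Int) (rest : List (Int × Int × Int))
    (vis neg : PySem.Set (Int × Int)) (passes : Int) :
    pvLoopA height width ((p, a, b) :: rest) vis neg passes =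
      (if PySem.Set.discard neg (a, b) = [] then p
       else pvLoopA height width (pvExpandA height width p a b (rest, vis)).1
         (pvExpandA height width p a b (rest, vis)).2 (PySem.Set.discard neg (a, b)) p) := by
  rw [pvLoopA]

-- ----- the wave intermediate -----

def pvNbrs (c : Int × Int) : List (Int × Int) :=
  [(c.1 + 1, c.2), (c.1 - 1, c.2), (c.1, c.2 + 1), (c.1, c.2 - 1)]

theorem pvNbrs_nodup (c : Int × Int) : (pvNbrs c).Nodup := by
  simp [pvNbrs, Prod.ext_iff]; omega

theorem pvNbrs_symm (c n : Int × Int) : n ∈ pvNbrs c ↔ c ∈ pvNbrs n := by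
  simp [pvNbrs, Prod.ext_iff]; omega

theorem pvNbrs_eq_dirs (c : Int × Int) :
    pvNbrs c = pvDirsB.map (fun d => (c.1 + d.1, c.2 + d.2)) := by
  simp [pvNbrs, pvDirsB, Prod.ext_iff]; omega

def pvStepB (height width : Int)
    (st : List (Int × Int) × PySem.Set (Int × Int) × Nat) (n : Int × Int) :
    List (Int × Int) × PySem.Set (Int × Int) × Nat :=
  if 0 ≤ n.1 ∧ n.1 < height ∧ 0 ≤ n.2 ∧ n.2 < width ∧ n ∉ st.2.1 then
    (st.1 ++ [n], PySem.Set.add st.2.1 n, st.2.2 - 1)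
  else st

def pvProcCell (height width : Int)
    (st : List (Int × Int) × PySem.Set (Int × Int) × Nat) (c : Int × Int) :
    List (Int × Int) × PySem.Set (Int × Int) × Nat :=
  (pvNbrs c).foldl (pvStepB height width) st

def pvProcWave (height width : Int) (cur : List (Int × Int))
    (st : List (Int × Int) × PySem.Set (Int × Int) × Nat) :
    List (Int × Int) × PySem.Set (Int × Int) × Nat :=
  cur.foldl (pvProcCell height width) st

-- the wave step over one cell, in closed form
theorem pvFoldB_char (height width : Int) (ns : List (Int × Int)) :
    ∀ (nxt : List (Int × Int)) (vis : PySem.Set (Int × Int)) (rem : Nat), ns.Nodup →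
    ns.foldl (pvStepB height width) (nxt, vis, rem)
      = (nxt ++ ns.filter (fun n => n ∈ pvCells height width ∧ n ∉ vis),
         PySem.Set.update vis (ns.filter (fun n => n ∈ pvCells height width ∧ n ∉ vis)),
         rem - (ns.filter (fun n => n ∈ pvCells height width ∧ n ∉ vis)).length) := by
  induction ns with
  | nil => intro nxt vis rem _; simp [PySem.Set.update_nil]
  | cons n ns ih =>
    intro nxt vis rem hnd
    obtain ⟨hn_nin, hnd'⟩ := List.nodup_cons.mp hnd
    rw [List.foldl_cons]
    by_cases hP : n ∈ pvCells height width ∧ n ∉ vis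
    · have hb := (pvMem_pvCells height width n).mp hP.1
      have hstep : pvStepB height width (nxt, vis, rem) n
          = (nxt ++ [n], PySem.Set.add vis n, rem - 1) := by
        unfold pvStepB
        rw [if_pos ⟨hb.1, hb.2.1, hb.2.2.1, hb.2.2.2, hP.2⟩]
      rw [hstep, ih _ _ _ hnd']
      have hfe : ns.filter (fun m => m ∈ pvCells height width ∧ m ∉ PySem.Set.add vis n)
               = ns.filter (fun m => m ∈ pvCells height width ∧ m ∉ vis) := by
        apply List.filter_congr
        intro m hm
        have hmn : m ≠ n := fun h => hn_nin (h ▸ hm)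
        simp [PySem.Set.mem_add, hmn]
      have hfc : (n :: ns).filter (fun m => m ∈ pvCells height width ∧ m ∉ vis)
          = n :: ns.filter (fun m => m ∈ pvCells height width ∧ m ∉ vis) :=
        List.filter_cons_of_pos (by simpa using hP)
      rw [hfe, hfc, PySem.Set.update_cons]
      simp only [List.cons_append, List.append_assoc, List.singleton_append, List.length_cons,
        Prod.mk.injEq]
      exact ⟨by simp, by simp, by omega⟩
    · have hstep : pvStepB height width (nxt, vis, rem) n = (nxt, vis, rem) := by
        unfold pvStepB
        rw [if_neg (by
          rintro ⟨b1, b2, b3, b4, b5⟩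
          exact hP ⟨(pvMem_pvCells height width n).mpr ⟨b1, b2, b3, b4⟩, b5⟩)]
      rw [hstep, ih _ _ _ hnd',
        List.filter_cons_of_neg (by simpa using hP)]

-- whole-wave closed form, with a full characterisation of the converted cells Δ
theorem pvWaveDelta (height width : Int) (cur : List (Int × Int)) :
    ∀ (nxt : List (Int × Int)) (vis : PySem.Set (Int × Int)) (rem : Nat),
    ∃ Δ : List (Int × Int),
      pvProcWave height width cur (nxt, vis, rem)
        = (nxt ++ Δ, PySem.Set.update vis Δ, rem - Δ.length)
      ∧ Δ.Nodup
      ∧ (∀ n, n ∈ Δ ↔ (n ∈ pvCells height width ∧ n ∉ vis ∧ ∃ c ∈ cur, n ∈ pvNbrs c)) := by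
  induction cur with
  | nil =>
    intro nxt vis rem
    exact ⟨[], by simp [pvProcWave, PySem.Set.update_nil], List.nodup_nil, by simp⟩
  | cons c cur' ih =>
    intro nxt vis rem
    have hcell := pvFoldB_char height width (pvNbrs c) nxt vis rem (pvNbrs_nodup c)
    set Δc := (pvNbrs c).filter (fun n => n ∈ pvCells height width ∧ n ∉ vis) with hΔc
    obtain ⟨Δ', h1', h2', h3'⟩ := ih (nxt ++ Δc) (PySem.Set.update vis Δc) (rem - Δc.length)
    refine ⟨Δc ++ Δ', ?_, ?_, ?_⟩
    · show pvProcWave height width cur' (pvProcCell height width (nxt, vis, rem) c) = _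
      rw [show pvProcCell height width (nxt, vis, rem) c
            = (nxt ++ Δc, PySem.Set.update vis Δc, rem - Δc.length) from hcell]
      rw [h1', PySem.Set.update_append]
      simp only [List.append_assoc, List.length_append, Prod.mk.injEq]
      exact ⟨by simp, by simp, by omega⟩
    · refine List.Nodup.append ((pvNbrs_nodup c).filter _) h2' ?_
      intro a ha1 ha2
      exact ((h3' a).mp ha2).2.1 ((PySem.Set.mem_update vis Δc a).mpr (Or.inr ha1))
    · intro n
      constructor
      · intro hn
        rcases List.mem_append.mp hn with h | h
        · rw [hΔc] at h
          simp only [List.mem_filter, decide_eq_true_eq] at h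
          exact ⟨h.2.1, h.2.2, c, List.mem_cons_self, h.1⟩
        · obtain ⟨hcells, hnu, c', hc', hnbr⟩ := (h3' n).mp h
          exact ⟨hcells, fun hv => hnu ((PySem.Set.mem_update vis Δc n).mpr (Or.inl hv)),
            c', List.mem_cons_of_mem c hc', hnbr⟩
      · rintro ⟨hcells, hnv, c'', hc'', hnbr⟩
        rcases List.mem_cons.mp hc'' with rfl | hc'tail
        · exact List.mem_append.mpr (Or.inl (by
            rw [hΔc]
            exact List.mem_filter.mpr ⟨hnbr, by simp [hcells, hnv]⟩))
        · by_cases hnΔc : n ∈ Δc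
          · exact List.mem_append.mpr (Or.inl hnΔc)
          · refine List.mem_append.mpr (Or.inr ((h3' n).mpr ⟨hcells, ?_, c'', hc'tail, hnbr⟩))
            intro hu
            rcases (PySem.Set.mem_update vis Δc n).mp hu with h | h
            exacts [hnv h, hnΔc h]

theorem pvProcWave_spec (height width : Int) (cur : List (Int × Int)) :
    ∀ (nxt : List (Int × Int)) (vis : PySem.Set (Int × Int)) (rem : Nat),
    ∃ Δ : List (Int × Int),
      pvProcWave height width cur (nxt, vis, rem)
        = (nxt ++ Δ, PySem.Set.update vis Δ, rem - Δ.length)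
      ∧ Δ.Nodup ∧ ∀ n ∈ Δ, n ∈ pvCells height width ∧ n ∉ vis := by
  intro nxt vis rem
  obtain ⟨Δ, h1, h2, h3⟩ := pvWaveDelta height width cur nxt vis rem
  exact ⟨Δ, h1, h2, fun n hn => ⟨((h3 n).mp hn).1, ((h3 n).mp hn).2.1⟩⟩

-- the wave-by-wave recursion (proof-only intermediate between A's queue and B's sweeps)
def pvLoopB (height width : Int) (cur : List (Int × Int))
    (vis : PySem.Set (Int × Int)) (rem : Nat) (passes : Int) : Int :=
  if cur = [] ∨ rem = 0 then (if rem = 0 then passes else -1)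
  else
    pvLoopB height width (pvProcWave height width cur ([], vis, rem)).1
      (pvProcWave height width cur ([], vis, rem)).2.1
      (pvProcWave height width cur ([], vis, rem)).2.2
      (if (pvProcWave height width cur ([], vis, rem)).1 ≠ [] then passes + 1 else passes)
termination_by 2 * rem + (if cur = [] then 0 else 1)
decreasing_by
  rename_i hcond
  obtain ⟨Δ, hst, hnd, hprops⟩ := pvProcWave_spec height width cur [] vis rem
  have hrem : rem ≠ 0 := fun h0 => hcond (Or.inr h0)
  have hcur : ¬ (cur = []) := fun h0 => hcond (Or.inl h0)
  simp only [hst, List.nil_append, hcur]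
  rcases Δ with _ | ⟨d, Δ'⟩
  · simp
  · simp; omega

def pvFinish (height width : Int) (cur nxt : List (Int × Int))
    (vis : PySem.Set (Int × Int)) (rem : Nat) (p : Int) : Int :=
  pvLoopB height width (pvProcWave height width cur (nxt, vis, rem)).1
    (pvProcWave height width cur (nxt, vis, rem)).2.1
    (pvProcWave height width cur (nxt, vis, rem)).2.2
    (if (pvProcWave height width cur (nxt, vis, rem)).1 ≠ [] then p + 1 else p)

theorem pvLoopB_eq (height width : Int) (cur : List (Int × Int))
    (vis : PySem.Set (Int × Int)) (rem : Nat) (passes : Int) :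
    pvLoopB height width cur vis rem passes =
      if cur = [] ∨ rem = 0 then (if rem = 0 then passes else -1)
      else pvFinish height width cur [] vis rem passes := by
  rw [pvLoopB, pvFinish]

theorem pvSweepLoop_eq (height width : Int) (g : List (List Int)) (passes : Int) :
    pvSweepLoop height width g passes =
      if pvFlips g height width = [] then
        (if (pvCells height width).all (fun c => decide (0 ≤ pvGet g c.1 c.2)) then passes else -1)
      else pvSweepLoop height width (pvApply g (pvFlips g height width)) (passes + 1) := by
  rw [pvSweepLoop]
  split_ifs with h1 h2 <;> simp_all

def pvNegs (matrix : List (List Int)) (height width : Int) : List (Int × Int) :=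
  (pvCells height width).filter (fun c => pvGet matrix c.1 c.2 < 0)

theorem pvNodup_pvNegs (matrix : List (List Int)) (height width : Int) :
    (pvNegs matrix height width).Nodup := (pvNodup_pvCells height width).filter _

-- once every in-bounds cell is visited, a wave converts nothing
theorem pvProcWave_noop (height width : Int) (cur nxt : List (Int × Int))
    (vis : PySem.Set (Int × Int)) (rem : Nat)
    (hall : ∀ c ∈ pvCells height width, c ∈ vis) :
    pvProcWave height width cur (nxt, vis, rem) = (nxt, vis, rem) := by
  obtain ⟨Δ, h1, _, h3⟩ := pvProcWave_spec height width cur nxt vis rem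
  have hΔ : Δ = [] := by
    rcases Δ with _ | ⟨d, Δ'⟩
    · rfl
    · exact absurd (hall d (h3 d (by simp)).1) (h3 d (by simp)).2
  rw [h1, hΔ]
  simp [PySem.Set.update_nil]

-- the nested scan loops are a single fold over the row-major cell list
theorem pvNestedFoldl {σ : Type} (height width : Int) (g : σ → (Int × Int) → σ) (init : σ) :
    (PySem.List.pyRange 0 height 1).foldl (fun st h =>
      (PySem.List.pyRange 0 width 1).foldl (fun st w => g st (h, w)) st) init
    = (pvCells height width).foldl g init := by
  unfold pvCells
  rw [List.foldl_flatMap]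
  congr 1
  funext st h
  rw [List.foldl_map]

theorem pvScanAFold (matrix : List (List Int)) :
    ∀ (L : List (Int × Int)) (neg vis : PySem.Set (Int × Int)) (q : List (Int × Int × Int)),
    L.foldl (fun st (c : Int × Int) =>
        if pvGet matrix c.1 c.2 < 0 then (PySem.Set.add st.1 c, st.2.1, st.2.2)
        else if pvGet matrix c.1 c.2 = 0 then (st.1, PySem.Set.add st.2.1 c, st.2.2)
        else (st.1, PySem.Set.add st.2.1 c, st.2.2 ++ [((0 : Int), c.1, c.2)])) (neg, vis, q)
      = (PySem.Set.update neg (L.filter (fun c => pvGet matrix c.1 c.2 < 0)),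
         PySem.Set.update vis (L.filter (fun c => 0 ≤ pvGet matrix c.1 c.2)),
         q ++ (L.filter (fun c => 0 < pvGet matrix c.1 c.2)).map (fun c => ((0 : Int), c.1, c.2))) := by
  intro L
  induction L with
  | nil => intro neg vis q; simp [PySem.Set.update_nil]
  | cons c L' ih =>
    intro neg vis q
    rw [List.foldl_cons]
    by_cases hneg : pvGet matrix c.1 c.2 < 0
    · have e1 : (c :: L').filter (fun c => pvGet matrix c.1 c.2 < 0)
          = c :: L'.filter (fun c => pvGet matrix c.1 c.2 < 0) := by
        rw [List.filter_cons_of_pos (by simpa using hneg)]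
      have e2 : (c :: L').filter (fun c => 0 ≤ pvGet matrix c.1 c.2)
          = L'.filter (fun c => 0 ≤ pvGet matrix c.1 c.2) := by
        rw [List.filter_cons_of_neg (by simp; omega)]
      have e3 : (c :: L').filter (fun c => 0 < pvGet matrix c.1 c.2)
          = L'.filter (fun c => 0 < pvGet matrix c.1 c.2) := by
        rw [List.filter_cons_of_neg (by simp; omega)]
      rw [if_pos hneg, ih, e1, e2, e3, PySem.Set.update_cons]
    · by_cases hz : pvGet matrix c.1 c.2 = 0
      · have e1 : (c :: L').filter (fun c => pvGet matrix c.1 c.2 < 0)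
            = L'.filter (fun c => pvGet matrix c.1 c.2 < 0) := by
          rw [List.filter_cons_of_neg (by simpa using hneg)]
        have e2 : (c :: L').filter (fun c => 0 ≤ pvGet matrix c.1 c.2)
            = c :: L'.filter (fun c => 0 ≤ pvGet matrix c.1 c.2) := by
          rw [List.filter_cons_of_pos (by simp; omega)]
        have e3 : (c :: L').filter (fun c => 0 < pvGet matrix c.1 c.2)
            = L'.filter (fun c => 0 < pvGet matrix c.1 c.2) := by
          rw [List.filter_cons_of_neg (by simp; omega)]
        rw [if_neg hneg, if_pos hz, ih, e1, e2, e3, PySem.Set.update_cons]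
      · have e1 : (c :: L').filter (fun c => pvGet matrix c.1 c.2 < 0)
            = L'.filter (fun c => pvGet matrix c.1 c.2 < 0) := by
          rw [List.filter_cons_of_neg (by simpa using hneg)]
        have e2 : (c :: L').filter (fun c => 0 ≤ pvGet matrix c.1 c.2)
            = c :: L'.filter (fun c => 0 ≤ pvGet matrix c.1 c.2) := by
          rw [List.filter_cons_of_pos (by simp; omega)]
        have e3 : (c :: L').filter (fun c => 0 < pvGet matrix c.1 c.2)
            = c :: L'.filter (fun c => 0 < pvGet matrix c.1 c.2) := by
          rw [List.filter_cons_of_pos (by simp; omega)]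
        rw [if_neg hneg, if_neg hz, ih, e1, e2, e3, PySem.Set.update_cons]
        simp [List.append_assoc]

theorem pvScanA_eq (matrix : List (List Int)) (height width : Int) :
    pvScanA matrix height width
      = (pvNegs matrix height width,
         (pvCells height width).filter (fun c => 0 ≤ pvGet matrix c.1 c.2),
         ((pvCells height width).filter (fun c => 0 < pvGet matrix c.1 c.2)).map
           (fun c => ((0 : Int), c.1, c.2))) := by
  have h : pvScanA matrix height width
      = (pvCells height width).foldl (fun st (c : Int × Int) =>
          if pvGet matrix c.1 c.2 < 0 then (PySem.Set.add st.1 c, st.2.1, st.2.2)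
          else if pvGet matrix c.1 c.2 = 0 then (st.1, PySem.Set.add st.2.1 c, st.2.2)
          else (st.1, PySem.Set.add st.2.1 c, st.2.2 ++ [((0 : Int), c.1, c.2)]))
          (PySem.Set.empty, PySem.Set.empty, []) := by
    unfold pvScanA
    exact pvNestedFoldl height width (fun st (c : Int × Int) =>
      if pvGet matrix c.1 c.2 < 0 then (PySem.Set.add st.1 c, st.2.1, st.2.2)
      else if pvGet matrix c.1 c.2 = 0 then (st.1, PySem.Set.add st.2.1 c, st.2.2)
      else (st.1, PySem.Set.add st.2.1 c, st.2.2 ++ [((0 : Int), c.1, c.2)]))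
      (PySem.Set.empty, PySem.Set.empty, [])
  rw [h, pvScanAFold]
  rw [pvEmptyUpdate _ ((pvNodup_pvCells height width).filter _),
      pvEmptyUpdate _ ((pvNodup_pvCells height width).filter _)]
  simp [pvNegs]

-- invariant tying A's queue state to the wave state
def pvInv (matrix : List (List Int)) (height width : Int)
    (cur nxt : List (Int × Int)) (vis neg : PySem.Set (Int × Int)) (rem : Nat) : Prop :=
  (∀ c, c ∈ neg ↔ (c ∈ pvNegs matrix height width ∧ (c ∉ vis ∨ c ∈ cur ++ nxt)))
  ∧ rem = ((pvNegs matrix height width).filter (fun c => c ∉ vis)).length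
  ∧ (∀ c ∈ pvCells height width, 0 ≤ pvGet matrix c.1 c.2 → c ∈ vis)
  ∧ (cur ++ nxt).Nodup
  ∧ (∀ c ∈ cur ++ nxt, c ∈ vis)
  ∧ (∀ c ∈ nxt, c ∈ pvNegs matrix height width)

-- when the remaining counter is 0 every in-bounds cell is visited
theorem pvAllVis (matrix : List (List Int)) (height width : Int)
    (vis : PySem.Set (Int × Int))
    (h2 : (0 : Nat) = ((pvNegs matrix height width).filter (fun c => c ∉ vis)).length)
    (h3 : ∀ c ∈ pvCells height width, 0 ≤ pvGet matrix c.1 c.2 → c ∈ vis) :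
    ∀ c ∈ pvCells height width, c ∈ vis := by
  intro c hc
  by_cases hm : 0 ≤ pvGet matrix c.1 c.2
  · exact h3 c hc hm
  · have hcn : c ∈ pvNegs matrix height width := by
      simp only [pvNegs, List.mem_filter]
      exact ⟨hc, by simp; omega⟩
    have hnil : (pvNegs matrix height width).filter (fun c => c ∉ vis) = [] :=
      List.length_eq_zero_iff.mp h2.symm
    by_contra hcv
    have : c ∈ (pvNegs matrix height width).filter (fun c => c ∉ vis) :=
      List.mem_filter.mpr ⟨hcn, by simpa using hcv⟩
    rw [hnil] at this
    exact absurd this (List.not_mem_nil)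

-- the A-side fold and the wave fold convert the same fresh cells Δ
theorem pvFoldPair (height width p : Int) (ns : List (Int × Int)) :
    ∀ (rest : List (Int × Int × Int)) (nxt : List (Int × Int))
      (vis : PySem.Set (Int × Int)) (rem : Nat),
    ∃ Δ : List (Int × Int),
      ns.foldl (fun st n =>
          if (n.1, n.2) ∈ st.2 then st
          else if n.1 < 0 ∨ n.2 < 0 ∨ n.1 ≥ height ∨ n.2 ≥ width then st
          else (st.1 ++ [(p + 1, n.1, n.2)], PySem.Set.add st.2 (n.1, n.2))) (rest, vis)
        = (rest ++ Δ.map (fun n => (p + 1, n.1, n.2)), PySem.Set.update vis Δ)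
      ∧ ns.foldl (pvStepB height width) (nxt, vis, rem)
        = (nxt ++ Δ, PySem.Set.update vis Δ, rem - Δ.length)
      ∧ Δ.Nodup ∧ ∀ n ∈ Δ, n ∈ pvCells height width ∧ n ∉ vis := by
  induction ns with
  | nil =>
    intro rest nxt vis rem
    exact ⟨[], by simp [PySem.Set.update_nil], by simp [PySem.Set.update_nil], List.nodup_nil, by simp⟩
  | cons n ns ih =>
    intro rest nxt vis rem
    simp only [List.foldl_cons]
    by_cases hv : n ∈ vis
    · have hA : ((n.1, n.2) ∈ vis) := by rwa [Prod.mk.eta]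
      rw [if_pos hA]
      have hB : pvStepB height width (nxt, vis, rem) n = (nxt, vis, rem) := by
        unfold pvStepB
        rw [if_neg (by simp [hv])]
      rw [hB]
      exact ih rest nxt vis rem
    · by_cases hin : 0 ≤ n.1 ∧ n.1 < height ∧ 0 ≤ n.2 ∧ n.2 < width
      · have hA : ¬ ((n.1, n.2) ∈ vis) := by rwa [Prod.mk.eta]
        rw [if_neg hA, if_neg (by omega)]
        have hB : pvStepB height width (nxt, vis, rem) n
            = (nxt ++ [n], PySem.Set.add vis n, rem - 1) := by
          unfold pvStepB
          rw [if_pos ⟨hin.1, hin.2.1, hin.2.2.1, hin.2.2.2, hv⟩]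
        rw [hB]
        obtain ⟨Δ', h1, h2, h3, h4⟩ :=
          ih (rest ++ [(p + 1, n.1, n.2)]) (nxt ++ [n]) (PySem.Set.add vis n) (rem - 1)
        refine ⟨n :: Δ', ?_, ?_, ?_, ?_⟩
        · rw [Prod.mk.eta] at h1 ⊢
          rw [h1, PySem.Set.update_cons]
          simp [List.append_assoc]
        · rw [h2, PySem.Set.update_cons]
          simp only [List.append_assoc, List.singleton_append, List.length_cons]
          rw [Nat.sub_sub, Nat.add_comm]
        · refine List.nodup_cons.mpr ⟨?_, h3⟩
          intro hn
          exact (h4 n hn).2 (by simp [PySem.Set.mem_add])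
        · intro a ha
          rcases List.mem_cons.mp ha with rfl | ha'
          · exact ⟨(pvMem_pvCells height width a).mpr hin, hv⟩
          · obtain ⟨hc, hnv⟩ := h4 a ha'
            refine ⟨hc, fun hav => hnv ?_⟩
            simp [PySem.Set.mem_add, hav]
      · have hA : ¬ ((n.1, n.2) ∈ vis) := by rwa [Prod.mk.eta]
        rw [if_neg hA, if_pos (by omega)]
        have hB : pvStepB height width (nxt, vis, rem) n = (nxt, vis, rem) := by
          unfold pvStepB
          rw [if_neg (by tauto)]
        rw [hB]
        exact ih rest nxt vis rem

-- the core bisimulation: A's labelled FIFO from a wave-decomposed queue equals the wave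
-- recursion from the corresponding mid-wave state
theorem pvMain (matrix : List (List Int)) (height width : Int) :
    ∀ (M : Nat) (cur nxt : List (Int × Int)) (vis neg : PySem.Set (Int × Int))
      (rem : Nat) (p p0 : Int),
    2 * (cur.length + nxt.length + pvUnvis height width vis)
        + (if cur = [] ∧ nxt ≠ [] then 1 else 0) ≤ M →
    pvInv matrix height width cur nxt vis neg rem →
    (cur = [] ∧ nxt = [] → p0 = p) →
    pvLoopA height width
        (cur.map (fun c => (p, c.1, c.2)) ++ nxt.map (fun c => (p + 1, c.1, c.2))) vis neg p0
      = pvFinish height width cur nxt vis rem p := by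
  intro M
  induction M using Nat.strong_induction_on with
  | _ M ih =>
  intro cur nxt vis neg rem p p0 hM hInv hp0
  obtain ⟨i1, i2, i3, i4, i5, i6⟩ := hInv
  rcases hcur : cur with _ | ⟨c, cs⟩
  · subst hcur
    rcases hnxt : nxt with _ | ⟨d, ds⟩
    · subst hnxt
      simp only [List.map_nil, List.nil_append]
      rw [pvLoopA_nil]
      have hfin : pvFinish height width [] [] vis rem p = if rem = 0 then p else -1 := by
        unfold pvFinish pvProcWave
        simp only [List.foldl_nil, ne_eq, not_true_eq_false, if_false]
        rw [pvLoopB_eq]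
        simp
      rw [hfin]
      by_cases hrem : rem = 0
      · have hlen0 : ((pvNegs matrix height width).filter (fun c => c ∉ vis)).length = 0 := by
          omega
        have hfil : (pvNegs matrix height width).filter (fun c => c ∉ vis) = [] :=
          List.length_eq_zero_iff.mp hlen0
        have hnil : neg = [] := by
          refine List.eq_nil_iff_forall_not_mem.mpr (fun c hc => ?_)
          obtain ⟨hcn, hdisj⟩ := (i1 c).mp hc
          rcases hdisj with hnv | hmem
          · have hcf : c ∈ (pvNegs matrix height width).filter (fun c => c ∉ vis) :=
              List.mem_filter.mpr ⟨hcn, by simpa using hnv⟩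
            rw [hfil] at hcf
            exact List.not_mem_nil hcf
          · simp at hmem
        rw [if_neg (by simp [hnil]), if_pos hrem]
        exact hp0 ⟨rfl, rfl⟩
      · have hlen : ((pvNegs matrix height width).filter (fun c => c ∉ vis)).length ≠ 0 := by
          omega
        have hfne : (pvNegs matrix height width).filter (fun c => c ∉ vis) ≠ [] := by
          intro h0; rw [h0] at hlen; exact hlen rfl
        obtain ⟨c, hc⟩ := List.exists_mem_of_ne_nil _ hfne
        obtain ⟨hcn, hnv⟩ := List.mem_filter.mp hc
        have hcneg : c ∈ neg := (i1 c).mpr ⟨hcn, Or.inl (by simpa using hnv)⟩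
        have hne : neg ≠ [] := fun h0 => by rw [h0] at hcneg; exact List.not_mem_nil hcneg
        rw [if_pos hne, if_neg hrem]
    · subst hnxt
      have hfin : pvFinish height width [] (d :: ds) vis rem p
          = pvLoopB height width (d :: ds) vis rem (p + 1) := by
        unfold pvFinish pvProcWave
        simp
      have hall : rem = 0 → ∀ c ∈ pvCells height width, c ∈ vis := fun hrem =>
        pvAllVis matrix height width vis (by omega) i3
      have hgoal : pvFinish height width [] (d :: ds) vis rem p
          = pvFinish height width (d :: ds) [] vis rem (p + 1) := by
        rw [hfin, pvLoopB_eq]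
        by_cases hrem : rem = 0
        · rw [if_pos (Or.inr hrem)]
          unfold pvFinish
          rw [pvProcWave_noop height width _ _ _ _ (hall hrem)]
          simp only [ne_eq, not_true_eq_false, reduceIte]
          rw [pvLoopB_eq]
          simp [hrem]
        · rw [if_neg (by simp [hrem])]
      rw [hgoal]
      have hmeas : 1 ≤ M := by
        by_cases h : ([] : List (Int × Int)) = [] ∧ (d :: ds) ≠ []
        · simp [h] at hM; omega
        · simp at h
      have hih := ih (M - 1) (by omega) (d :: ds) [] vis neg rem (p + 1) p0
        (by simp at hM ⊢; omega)
        (by refine ⟨fun c => ?_, i2, i3, ?_, fun c hc => ?_, fun c hc => ?_⟩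
            · simpa using i1 c
            · simpa using i4
            · exact i5 c (by simpa using hc)
            · simp at hc)
        (by rintro ⟨h, -⟩; exact absurd h (List.cons_ne_nil d ds))
      simp only [List.map_nil, List.nil_append, List.append_nil] at hih ⊢
      exact hih
  · subst hcur
    simp only [List.map_cons, List.cons_append]
    rw [pvLoopA_cons]
    have hcvis : c ∈ vis := i5 c (by simp)
    have hnd' : c ∉ cs ++ nxt ∧ (cs ++ nxt).Nodup := by
      have h := i4
      simp only [List.cons_append] at h
      exact List.nodup_cons.mp h
    have i1' : ∀ x, x ∈ PySem.Set.discard neg (c.1, c.2) ↔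
        (x ∈ pvNegs matrix height width ∧ (x ∉ vis ∨ x ∈ cs ++ nxt)) := by
      intro x
      rw [Prod.mk.eta, PySem.Set.mem_discard]
      constructor
      · rintro ⟨hxn, hxne⟩
        obtain ⟨hneg, hdisj⟩ := (i1 x).mp hxn
        refine ⟨hneg, ?_⟩
        rcases hdisj with h | h
        · exact Or.inl h
        · simp only [List.cons_append, List.mem_cons] at h
          rcases h with rfl | h
          · exact absurd rfl hxne
          · exact Or.inr h
      · rintro ⟨hneg, hdisj⟩
        have hxne : x ≠ c := by
          rcases hdisj with h | h
          · exact fun hxc => h (hxc ▸ hcvis)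
          · exact fun hxc => hnd'.1 (hxc ▸ h)
        refine ⟨(i1 x).mpr ⟨hneg, ?_⟩, hxne⟩
        rcases hdisj with h | h
        · exact Or.inl h
        · exact Or.inr (by simp [List.cons_append, List.mem_cons, h])
    by_cases hstop : PySem.Set.discard neg (c.1, c.2) = []
    · rw [if_pos hstop]
      have hvisneg : ∀ a ∈ pvNegs matrix height width, a ∈ vis := by
        intro a han
        by_contra hav
        have : a ∈ PySem.Set.discard neg (c.1, c.2) := (i1' a).mpr ⟨han, Or.inl hav⟩
        rw [hstop] at this
        exact List.not_mem_nil this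
      have hrem0 : rem = 0 := by
        have : (pvNegs matrix height width).filter (fun c => c ∉ vis) = [] := by
          apply List.filter_eq_nil_iff.mpr
          intro a ha
          simp [hvisneg a ha]
        rw [i2, this]
        rfl
      have hnxt0 : nxt = [] := by
        refine List.eq_nil_iff_forall_not_mem.mpr (fun a ha => ?_)
        have : a ∈ PySem.Set.discard neg (c.1, c.2) :=
          (i1' a).mpr ⟨i6 a ha, Or.inr (List.mem_append.mpr (Or.inr ha))⟩
        rw [hstop] at this
        exact List.not_mem_nil this
      subst hnxt0 hrem0
      unfold pvFinish
      rw [pvProcWave_noop height width _ _ _ _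
        (pvAllVis matrix height width vis (by omega) i3)]
      simp only [ne_eq, not_true_eq_false, reduceIte]
      rw [pvLoopB_eq]
      simp
    · rw [if_neg hstop]
      have hns : pvDirs.map (fun d => (d.1 + c.1, d.2 + c.2))
          = [(c.1 + 1, c.2), (c.1 - 1, c.2), (c.1, c.2 + 1), (c.1, c.2 - 1)] := by
        simp [pvDirs, Prod.ext_iff]
        omega
      obtain ⟨Δ, hA, hB, hΔnd, hΔp⟩ := pvFoldPair height width p
        [(c.1 + 1, c.2), (c.1 - 1, c.2), (c.1, c.2 + 1), (c.1, c.2 - 1)]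
        (cs.map (fun c => (p, c.1, c.2)) ++ nxt.map (fun c => (p + 1, c.1, c.2)))
        nxt vis rem
      have hAex : pvExpandA height width p c.1 c.2
          (cs.map (fun c => (p, c.1, c.2)) ++ nxt.map (fun c => (p + 1, c.1, c.2)), vis)
          = ((cs.map (fun c => (p, c.1, c.2)) ++ nxt.map (fun c => (p + 1, c.1, c.2)))
              ++ Δ.map (fun n => (p + 1, n.1, n.2)), PySem.Set.update vis Δ) := by
        rw [pvExpandA_eq, hns, hA]
      have hBpc : pvProcCell height width (nxt, vis, rem) c
          = (nxt ++ Δ, PySem.Set.update vis Δ, rem - Δ.length) := by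
        unfold pvProcCell pvNbrs
        exact hB
      have hΔnegs : ∀ n ∈ Δ, n ∈ pvNegs matrix height width := by
        intro n hn
        obtain ⟨hnc, hnv⟩ := hΔp n hn
        by_cases hm : 0 ≤ pvGet matrix n.1 n.2
        · exact absurd (i3 n hnc hm) hnv
        · exact List.mem_filter.mpr ⟨hnc, by simp; omega⟩
      have hunvis := pvUnvis_update height width Δ vis hΔnd hΔp
      have hcount := pvFilterUpdate (pvNegs matrix height width)
        (pvNodup_pvNegs matrix height width) Δ vis hΔnd (fun n hn => ⟨hΔnegs n hn, (hΔp n hn).2⟩)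
      rw [hAex]
      have hfinstep : pvFinish height width (c :: cs) nxt vis rem p
          = pvFinish height width cs (nxt ++ Δ) (PySem.Set.update vis Δ) (rem - Δ.length) p := by
        unfold pvFinish pvProcWave
        rw [List.foldl_cons, hBpc]
      rw [hfinstep]
      have hmeas1 : 1 ≤ M := by
        by_cases h : (c :: cs) = [] ∧ nxt ≠ []
        · exact absurd h.1 (List.cons_ne_nil c cs)
        · simp only [h, reduceIte] at hM
          simp at hM
          omega
      have hih := ih (M - 1) (by omega) cs (nxt ++ Δ) (PySem.Set.update vis Δ)
        (PySem.Set.discard neg (c.1, c.2)) (rem - Δ.length) p p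
        (by have hflag : (if (c :: cs) = [] ∧ nxt ≠ [] then 1 else 0) = 0 := by simp
            rw [hflag] at hM
            simp only [List.length_append, List.length_cons] at hM ⊢
            split_ifs <;> omega)
        (by refine ⟨?_, by omega, ?_, ?_, ?_, ?_⟩
            · intro x
              rw [i1' x]
              constructor
              · rintro ⟨hneg, hdisj⟩
                refine ⟨hneg, ?_⟩
                rcases hdisj with h | h
                · by_cases hxΔ : x ∈ Δ
                  · exact Or.inr (by
                      rcases List.mem_append.mp (List.mem_append.mpr (Or.inr hxΔ) :
                        x ∈ cs ++ Δ) with h' | h'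
                      · exact List.mem_append.mpr (Or.inl h')
                      · exact List.mem_append.mpr (Or.inr (List.mem_append.mpr (Or.inr h'))))
                  · refine Or.inl (fun hx => ?_)
                    rcases (PySem.Set.mem_update vis Δ x).mp hx with h' | h'
                    · exact h h'
                    · exact hxΔ h'
                · rcases List.mem_append.mp h with h' | h'
                  · exact Or.inr (List.mem_append.mpr (Or.inl h'))
                  · exact Or.inr (List.mem_append.mpr (Or.inr (List.mem_append.mpr (Or.inl h'))))
              · rintro ⟨hneg, hdisj⟩
                refine ⟨hneg, ?_⟩
                rcases hdisj with h | h
                · exact Or.inl (fun hx => h ((PySem.Set.mem_update vis Δ x).mpr (Or.inl hx)))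
                · rcases List.mem_append.mp h with h' | h'
                  · exact Or.inr (List.mem_append.mpr (Or.inl h'))
                  · rcases List.mem_append.mp h' with h'' | h''
                    · exact Or.inr (List.mem_append.mpr (Or.inr h''))
                    · exact Or.inl (hΔp x h'').2
            · intro c' hc' hm
              exact (PySem.Set.mem_update vis Δ c').mpr (Or.inl (i3 c' hc' hm))
            · rw [← List.append_assoc]
              refine List.Nodup.append hnd'.2 hΔnd ?_
              intro a ha1 ha2
              exact (hΔp a ha2).2 (i5 a (by simp only [List.cons_append, List.mem_cons]
                                            exact Or.inr ha1))
            · intro a ha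
              rw [← List.append_assoc] at ha
              rcases List.mem_append.mp ha with h | h
              · exact (PySem.Set.mem_update vis Δ a).mpr
                  (Or.inl (i5 a (by simp only [List.cons_append, List.mem_cons]
                                    exact Or.inr h)))
              · exact (PySem.Set.mem_update vis Δ a).mpr (Or.inr h)
            · intro a ha
              rcases List.mem_append.mp ha with h | h
              · exact i6 a h
              · exact hΔnegs a h)
        (fun _ => rfl)
      rw [List.append_assoc, ← List.map_append]
      exact hih

theorem pvFinish_eq_loopB (height width : Int) (F : List (Int × Int))
    (V : PySem.Set (Int × Int)) (R : Nat) (ps : Int)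
    (hall : R = 0 → ∀ c ∈ pvCells height width, c ∈ V) :
    pvFinish height width F [] V R ps = pvLoopB height width F V R ps := by
  rw [pvLoopB_eq]
  by_cases hF : F = []
  · subst hF
    rw [if_pos (Or.inl rfl)]
    unfold pvFinish pvProcWave
    simp only [List.foldl_nil, ne_eq, not_true_eq_false, reduceIte]
    rw [pvLoopB_eq]
    simp
  · by_cases hR : R = 0
    · rw [if_pos (Or.inr hR)]
      unfold pvFinish
      rw [pvProcWave_noop height width _ _ _ _ (hall hR)]
      simp only [ne_eq, not_true_eq_false, reduceIte]
      rw [pvLoopB_eq]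
      simp [hR]
    · rw [if_neg (by simp [hF, hR])]

-- ----- the wave ↔ sweep bridge -----

theorem pvHasPosNbr_iff (g : List (List Int)) (height width : Int) (c : Int × Int) :
    pvHasPosNbr g height width c = true ↔
      ∃ n ∈ pvNbrs c, n ∈ pvCells height width ∧ 0 < pvGet g n.1 n.2 := by
  unfold pvHasPosNbr
  rw [List.any_eq_true]
  constructor
  · rintro ⟨d, hd, hcond⟩
    simp only [decide_eq_true_eq] at hcond
    obtain ⟨b1, b2, b3, b4, b5⟩ := hcond
    refine ⟨(c.1 + d.1, c.2 + d.2), ?_, (pvMem_pvCells _ _ _).mpr ⟨b1, b2, b3, b4⟩, b5⟩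
    rw [pvNbrs_eq_dirs]
    exact List.mem_map.mpr ⟨d, hd, rfl⟩
  · rintro ⟨n, hn, hcell, hpos⟩
    rw [pvNbrs_eq_dirs] at hn
    obtain ⟨d, hd, rfl⟩ := List.mem_map.mp hn
    obtain ⟨b1, b2, b3, b4⟩ := (pvMem_pvCells _ _ _).mp hcell
    exact ⟨d, hd, by simp only [decide_eq_true_eq]; exact ⟨b1, b2, b3, b4, hpos⟩⟩

-- simulation invariant between a wave state (F, V, R) and B's working grid g
def pvSim (matrix : List (List Int)) (height width : Int) (F : List (Int × Int))
    (V : PySem.Set (Int × Int)) (R : Nat) (g : List (List Int)) : Prop :=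
  (∀ c ∈ pvCells height width,
      (pvGet g c.1 c.2 < 0 ↔ (pvGet matrix c.1 c.2 < 0 ∧ c ∉ V))
    ∧ (0 < pvGet g c.1 c.2 ↔ (0 < pvGet matrix c.1 c.2 ∨ (pvGet matrix c.1 c.2 < 0 ∧ c ∈ V))))
  ∧ R = ((pvNegs matrix height width).filter (fun c => c ∉ V)).length
  ∧ (∀ c ∈ pvCells height width, 0 ≤ pvGet matrix c.1 c.2 → c ∈ V)
  ∧ F.Nodup
  ∧ (∀ c ∈ F, c ∈ pvCells height width ∧ 0 < pvGet g c.1 c.2)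
  ∧ (∀ c ∈ pvCells height width, 0 < pvGet g c.1 c.2 → c ∉ F →
       ∀ n ∈ pvNbrs c, n ∈ pvCells height width → n ∈ V)

theorem pvBridge (matrix : List (List Int)) (height width : Int) :
    ∀ (R : Nat) (F : List (Int × Int)) (V : PySem.Set (Int × Int)) (g : List (List Int))
      (passes : Int),
    pvSim matrix height width F V R g →
    pvLoopB height width F V R passes = pvSweepLoop height width g passes := by
  intro R
  induction R using Nat.strong_induction_on with
  | _ R ih =>
  intro F V g passes hSim
  obtain ⟨h1, h2, h3, h4, h5, h6⟩ := hSim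
  by_cases hR : R = 0
  · have hnone : ∀ c ∈ pvCells height width, ¬ pvGet g c.1 c.2 < 0 := by
      intro c hc hneg
      obtain ⟨hmneg, hnv⟩ := (h1 c hc).1.mp hneg
      have hmem : c ∈ (pvNegs matrix height width).filter (fun c => c ∉ V) :=
        List.mem_filter.mpr ⟨List.mem_filter.mpr ⟨hc, by simpa using hmneg⟩, by simpa using hnv⟩
      have hnil : (pvNegs matrix height width).filter (fun c => c ∉ V) = [] :=
        List.length_eq_zero_iff.mp (by omega)
      rw [hnil] at hmem
      exact List.not_mem_nil hmem
    have hfl : pvFlips g height width = [] := by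
      refine List.eq_nil_iff_forall_not_mem.mpr (fun c hc => ?_)
      obtain ⟨hcell, hneg, _⟩ := (pvFlips_mem g height width c).mp hc
      exact hnone c hcell hneg
    have hall : (pvCells height width).all (fun c => decide (0 ≤ pvGet g c.1 c.2)) = true := by
      rw [List.all_eq_true]
      intro c hc
      exact decide_eq_true (by have := hnone c hc; omega)
    rw [pvLoopB_eq, if_pos (Or.inr hR), if_pos hR, pvSweepLoop_eq, if_pos hfl, if_pos hall]
  · have hexneg : ∃ c, c ∈ pvCells height width ∧ pvGet g c.1 c.2 < 0 := by
      have hne : (pvNegs matrix height width).filter (fun c => c ∉ V) ≠ [] := by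
        intro h0
        rw [h0] at h2
        simp at h2
        exact hR h2
      obtain ⟨c, hc⟩ := List.exists_mem_of_ne_nil _ hne
      obtain ⟨hcn, hnv⟩ := List.mem_filter.mp hc
      obtain ⟨hcell, hmneg⟩ := List.mem_filter.mp hcn
      exact ⟨c, hcell, (h1 c hcell).1.mpr ⟨by simpa using hmneg, by simpa using hnv⟩⟩
    have hallf : ¬ ((pvCells height width).all (fun c => decide (0 ≤ pvGet g c.1 c.2)) = true) := by
      obtain ⟨c, hcell, hneg⟩ := hexneg
      intro hall
      have := List.all_eq_true.mp hall c hcell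
      simp at this
      omega
    by_cases hF : F = []
    · subst hF
      have hfl : pvFlips g height width = [] := by
        refine List.eq_nil_iff_forall_not_mem.mpr (fun c hc => ?_)
        obtain ⟨hcell, hneg, hpn⟩ := (pvFlips_mem g height width c).mp hc
        obtain ⟨n, hn, hncell, hnpos⟩ := (pvHasPosNbr_iff g height width c).mp hpn
        have hcV : c ∈ V :=
          h6 n hncell hnpos List.not_mem_nil c ((pvNbrs_symm c n).mp hn) hcell
        exact ((h1 c hcell).1.mp hneg).2 hcV
      rw [pvLoopB_eq, if_pos (Or.inl rfl), if_neg hR, pvSweepLoop_eq, if_pos hfl, if_neg hallf]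
    · obtain ⟨Δ, hW, hΔnd, hΔmem⟩ := pvWaveDelta height width F [] V R
      have hFlipsIff : ∀ c, c ∈ pvFlips g height width ↔ c ∈ Δ := by
        intro c
        rw [pvFlips_mem, hΔmem]
        constructor
        · rintro ⟨hcell, hneg, hpn⟩
          obtain ⟨hmneg, hnv⟩ := (h1 c hcell).1.mp hneg
          obtain ⟨n, hn, hncell, hnpos⟩ := (pvHasPosNbr_iff g height width c).mp hpn
          by_cases hnF : n ∈ F
          · exact ⟨hcell, hnv, n, hnF, (pvNbrs_symm c n).mp hn⟩
          · exact absurd (h6 n hncell hnpos hnF c ((pvNbrs_symm c n).mp hn) hcell) hnv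
        · rintro ⟨hcell, hnv, cf, hcf, hnbr⟩
          obtain ⟨hcfcell, hcfpos⟩ := h5 cf hcf
          have hmneg : pvGet matrix c.1 c.2 < 0 := by
            by_contra hge
            exact hnv (h3 c hcell (by omega))
          exact ⟨hcell, (h1 c hcell).1.mpr ⟨hmneg, hnv⟩,
            (pvHasPosNbr_iff g height width c).mpr
              ⟨cf, (pvNbrs_symm c cf).mpr hnbr, hcfcell, hcfpos⟩⟩
      by_cases hΔe : Δ = []
      · subst hΔe
        have hfl : pvFlips g height width = [] :=
          List.eq_nil_iff_forall_not_mem.mpr (fun c hc => List.not_mem_nil ((hFlipsIff c).mp hc))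
        have hwave : pvLoopB height width F V R passes = -1 := by
          rw [pvLoopB_eq, if_neg (by simp [hF, hR])]
          unfold pvFinish
          rw [hW]
          simp only [List.nil_append, List.append_nil, PySem.Set.update_nil, List.length_nil,
            Nat.sub_zero, ne_eq, not_true_eq_false, reduceIte]
          rw [pvLoopB_eq]
          simp [hR]
        rw [hwave, pvSweepLoop_eq, if_pos hfl, if_neg hallf]
      · have hfl_ne : pvFlips g height width ≠ [] := by
          obtain ⟨d, hd⟩ := List.exists_mem_of_ne_nil _ hΔe
          exact List.ne_nil_of_mem ((hFlipsIff d).mpr hd)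
        have hΔprops : ∀ n ∈ Δ, n ∈ pvCells height width ∧ n ∉ V :=
          fun n hn => ⟨((hΔmem n).mp hn).1, ((hΔmem n).mp hn).2.1⟩
        have hΔmneg : ∀ n ∈ Δ, pvGet matrix n.1 n.2 < 0 := by
          intro n hn
          obtain ⟨hncell, hnv⟩ := hΔprops n hn
          by_contra hge
          exact hnv (h3 n hncell (by omega))
        have happ := pvApply_get (pvFlips g height width) g (pvFlips_nodup g height width)
          (pvFlips_props g height width)
        have hwave : pvLoopB height width F V R passes
            = pvLoopB height width Δ (PySem.Set.update V Δ) (R - Δ.length) (passes + 1) := by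
          rw [pvLoopB_eq, if_neg (by simp [hF, hR])]
          unfold pvFinish
          rw [hW]
          simp only [List.nil_append]
          rw [if_pos hΔe]
        have hcnt := pvFilterUpdate (pvNegs matrix height width)
          (pvNodup_pvNegs matrix height width) Δ V hΔnd
          (fun n hn => ⟨List.mem_filter.mpr ⟨(hΔprops n hn).1, by simpa using hΔmneg n hn⟩,
            (hΔprops n hn).2⟩)
        have hlenpos : 0 < Δ.length := List.length_pos_iff.mpr hΔe
        rw [hwave, pvSweepLoop_eq, if_neg hfl_ne]
        refine ih (R - Δ.length) (by omega) Δ (PySem.Set.update V Δ)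
          (pvApply g (pvFlips g height width)) (passes + 1) ⟨?_, by omega, ?_, hΔnd, ?_, ?_⟩
        · intro c hc
          obtain ⟨b1, _, b3, _⟩ := (pvMem_pvCells height width c).mp hc
          have ha := happ c.1 c.2 b1 b3
          have hmf : (((c.1, c.2) : Int × Int) ∈ pvFlips g height width) ↔ c ∈ Δ := by
            rw [Prod.mk.eta]; exact hFlipsIff c
          constructor
          · rw [ha]
            by_cases hcΔ : c ∈ Δ
            · rw [if_pos (hmf.mpr hcΔ)]
              constructor
              · intro h; omega
              · rintro ⟨_, hnu⟩
                exact absurd ((PySem.Set.mem_update V Δ c).mpr (Or.inr hcΔ)) hnu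
            · rw [if_neg (fun hmem => hcΔ (hmf.mp hmem))]
              rw [(h1 c hc).1]
              constructor
              · rintro ⟨hm, hnv⟩
                refine ⟨hm, fun hu => ?_⟩
                rcases (PySem.Set.mem_update V Δ c).mp hu with h | h
                exacts [hnv h, hcΔ h]
              · rintro ⟨hm, hnu⟩
                exact ⟨hm, fun hv => hnu ((PySem.Set.mem_update V Δ c).mpr (Or.inl hv))⟩
          · rw [ha]
            by_cases hcΔ : c ∈ Δ
            · rw [if_pos (hmf.mpr hcΔ)]
              constructor
              · intro _
                exact Or.inr ⟨hΔmneg c hcΔ, (PySem.Set.mem_update V Δ c).mpr (Or.inr hcΔ)⟩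
              · intro _; norm_num
            · rw [if_neg (fun hmem => hcΔ (hmf.mp hmem))]
              rw [(h1 c hc).2]
              constructor
              · rintro (h | ⟨hm, hv⟩)
                · exact Or.inl h
                · exact Or.inr ⟨hm, (PySem.Set.mem_update V Δ c).mpr (Or.inl hv)⟩
              · rintro (h | ⟨hm, hu⟩)
                · exact Or.inl h
                · rcases (PySem.Set.mem_update V Δ c).mp hu with h' | h'
                  · exact Or.inr ⟨hm, h'⟩
                  · exact absurd h' hcΔ
        · intro c hc hm
          exact (PySem.Set.mem_update V Δ c).mpr (Or.inl (h3 c hc hm))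
        · intro c hcΔ
          refine ⟨(hΔprops c hcΔ).1, ?_⟩
          obtain ⟨b1, _, b3, _⟩ := (pvMem_pvCells height width c).mp (hΔprops c hcΔ).1
          rw [happ c.1 c.2 b1 b3, if_pos (by rw [Prod.mk.eta]; exact (hFlipsIff c).mpr hcΔ)]
          norm_num
        · intro c hc hpos' hcΔ n hn hncell
          obtain ⟨b1, _, b3, _⟩ := (pvMem_pvCells height width c).mp hc
          rw [happ c.1 c.2 b1 b3,
            if_neg (by rw [Prod.mk.eta]; exact fun hmem => hcΔ ((hFlipsIff c).mp hmem))] at hpos'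
          by_cases hcF : c ∈ F
          · by_cases hnV : n ∈ V
            · exact (PySem.Set.mem_update V Δ n).mpr (Or.inl hnV)
            · exact (PySem.Set.mem_update V Δ n).mpr
                (Or.inr ((hΔmem n).mpr ⟨hncell, hnV, c, hcF, hn⟩))
          · exact (PySem.Set.mem_update V Δ n).mpr (Or.inl (h6 c hc hpos' hcF n hn hncell))

theorem pvGrid0_get (matrix : List (List Int)) (height width : Int) (c : Int × Int)
    (hc : c ∈ pvCells height width) :
    pvGet (pvGrid0 matrix height width) c.1 c.2 = pvGet matrix c.1 c.2 := by
  obtain ⟨b1, b2, b3, b4⟩ := (pvMem_pvCells height width c).mp hc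
  show PySem.List.pyGetD (PySem.List.pyGetD (pvGrid0 matrix height width) c.1 []) c.2 0 = _
  unfold pvGrid0
  rw [PySem.List.pyGetD_map_pyRange_of_nonneg _ height c.1 _ b1 b2,
      PySem.List.pyGetD_map_pyRange_of_nonneg _ width c.2 _ b3 b4]

theorem pvInitSim (matrix : List (List Int)) (height width : Int) :
    pvSim matrix height width
      ((pvCells height width).filter (fun c => 0 < pvGet matrix c.1 c.2))
      ((pvCells height width).filter (fun c => 0 ≤ pvGet matrix c.1 c.2))
      (pvNegs matrix height width).length
      (pvGrid0 matrix height width) := by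
  refine ⟨?_, ?_, ?_, (pvNodup_pvCells height width).filter _, ?_, ?_⟩
  · intro c hc
    rw [pvGrid0_get matrix height width c hc]
    constructor
    · constructor
      · intro hneg
        refine ⟨hneg, fun hv => ?_⟩
        obtain ⟨_, hge⟩ := List.mem_filter.mp hv
        simp only [decide_eq_true_eq] at hge
        omega
      · exact fun h => h.1
    · constructor
      · exact fun hpos => Or.inl hpos
      · rintro (h | ⟨hm, hv⟩)
        · exact h
        · obtain ⟨_, hge⟩ := List.mem_filter.mp hv
          simp only [decide_eq_true_eq] at hge
          omega
  · have hself : (pvNegs matrix height width).filter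
        (fun c => c ∉ (pvCells height width).filter (fun c => 0 ≤ pvGet matrix c.1 c.2))
        = pvNegs matrix height width := by
      refine List.filter_eq_self.mpr (fun a ha => ?_)
      obtain ⟨hcell, hneg⟩ := List.mem_filter.mp ha
      simp only [decide_eq_true_eq] at hneg ⊢
      intro hv
      obtain ⟨_, hge⟩ := List.mem_filter.mp hv
      simp only [decide_eq_true_eq] at hge
      omega
    rw [hself]
  · intro c hc hm
    exact List.mem_filter.mpr ⟨hc, by simpa using hm⟩
  · intro c hcF
    obtain ⟨hcell, hpos⟩ := List.mem_filter.mp hcF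
    simp only [decide_eq_true_eq] at hpos
    exact ⟨hcell, by rw [pvGrid0_get matrix height width c hcell]; exact hpos⟩
  · intro c hc hpos hcF n hn hncell
    exfalso
    apply hcF
    rw [pvGrid0_get matrix height width c hc] at hpos
    exact List.mem_filter.mpr ⟨hc, by simpa using hpos⟩

theorem pvPorts_eq (matrix : List (List Int)) :
    minimumPassesOfMatrix matrix = minimumPassesOfMatrix_alt matrix := by
  unfold minimumPassesOfMatrix minimumPassesOfMatrix_alt
  simp only []
  rw [pvScanA_eq]
  set height : Int := (matrix.length : Int) with hh
  set width : Int := ((PySem.List.pyGetD matrix 0 []).length : Int) with hw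
  set F := (pvCells height width).filter (fun c => 0 < pvGet matrix c.1 c.2) with hF
  set V := (pvCells height width).filter (fun c => 0 ≤ pvGet matrix c.1 c.2) with hV
  set N := pvNegs matrix height width with hN
  have hNV : ∀ a ∈ N, a ∉ V := by
    intro a ha hav
    have h1 := List.mem_filter.mp ha
    have h2 := List.mem_filter.mp hav
    simp at h1 h2
    omega
  have hInv : pvInv matrix height width F [] V N N.length := by
    refine ⟨?_, ?_, ?_, ?_, ?_, ?_⟩
    · intro c
      constructor
      · intro hc; exact ⟨hc, Or.inl (hNV c hc)⟩
      · exact fun h => h.1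
    · rw [List.filter_eq_self.mpr (fun a ha => by simpa using hNV a ha)]
    · intro c hc hm
      exact List.mem_filter.mpr ⟨hc, by simpa using hm⟩
    · simpa using (pvNodup_pvCells height width).filter _
    · intro a ha
      simp only [List.append_nil] at ha
      have h1 := List.mem_filter.mp ha
      refine List.mem_filter.mpr ⟨h1.1, ?_⟩
      have := h1.2
      simp at this ⊢
      omega
    · intro a ha; simp at ha
  have hmain := pvMain matrix height width
    (2 * (F.length + [].length + pvUnvis height width V)
      + (if F = [] ∧ ([] : List (Int × Int)) ≠ [] then 1 else 0))
    F [] V N N.length 0 0 (le_refl _) hInv (fun _ => rfl)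
  simp only [List.map_nil, List.append_nil] at hmain
  rw [hmain]
  rw [pvFinish_eq_loopB height width F V N.length 0 (fun hR0 => by
    intro c hc
    by_cases hm : 0 ≤ pvGet matrix c.1 c.2
    · exact List.mem_filter.mpr ⟨hc, by simpa using hm⟩
    · have hcn : c ∈ N := List.mem_filter.mpr ⟨hc, by simp; omega⟩
      rw [List.length_eq_zero_iff.mp hR0] at hcn
      exact absurd hcn (fun h => List.not_mem_nil h))]
  rw [hF, hV, hN]
  exact pvBridge matrix height width (pvNegs matrix height width).length
    ((pvCells height width).filter (fun c => 0 < pvGet matrix c.1 c.2))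
    ((pvCells height width).filter (fun c => 0 ≤ pvGet matrix c.1 c.2))
    (pvGrid0 matrix height width) 0 (pvInitSim matrix height width)

-- ===== VERDICT (by name: the statement is the Claim_ definition above) =====
theorem minimumPassesOfMatrix_spec : Claim_equal_minimumPassesOfMatrix := by
  intro matrix _ _
  exact pvPorts_eq matrix
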